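-- pv_equiv track=rewrite | github.com/b-rat/Graph_CAD | scripts/analyze_edit_data_bias.py | parse_instruction
-- ===== SOURCE A (Python) =====
-- def parse_instruction(instruction: str) -> dict:
--     """Extract parameter, direction, and magnitude from instruction."""
--     instruction = instruction.lower()
--
--     # Detect direction
--     if any(word in instruction for word in ["longer", "increase", "larger", "bigger", "thicker", "wider"]):
--         direction = "increase"
--     elif any(word in instruction for word in ["shorter", "decrease", "smaller", "thinner", "narrower"]):
--         direction = "decrease"
--     else:
--         direction = "unknown"
--
--     # Detect parameter
--     if "leg1" in instruction or "leg 1" in instruction: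
--         param = "leg1_length"
--     elif "leg2" in instruction or "leg 2" in instruction:
--         param = "leg2_length"
--     elif "width" in instruction:
--         param = "width"
--     elif "thickness" in instruction or "thick" in instruction:
--         param = "thickness"
--     elif "hole1" in instruction or "hole 1" in instruction:
--         param = "hole1_diameter"
--     elif "hole2" in instruction or "hole 2" in instruction:
--         param = "hole2_diameter"
--     else:
--         param = "unknown"
--
--     return {"param": param, "direction": direction}
-- ===== SOURCE B (Python) =====
-- # B: instead of running a substring search per keyword per branch, scan the text
-- # once position by position, collecting the set of all keywords that occur, then
-- # decide each label from that found-set by group priority.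
--
-- _ALL_KEYWORDS = (
--     "longer", "increase", "larger", "bigger", "thicker", "wider",
--     "shorter", "decrease", "smaller", "thinner", "narrower",
--     "leg1", "leg 1", "leg2", "leg 2", "width", "thickness", "thick",
--     "hole1", "hole 1", "hole2", "hole 2",
-- )
--
-- _DIRECTION_GROUPS = [
--     (("longer", "increase", "larger", "bigger", "thicker", "wider"), "increase"),
--     (("shorter", "decrease", "smaller", "thinner", "narrower"), "decrease"),
-- ]
--
-- _PARAM_GROUPS = [
--     (("leg1", "leg 1"), "leg1_length"),
--     (("leg2", "leg 2"), "leg2_length"),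
--     (("width",), "width"),
--     (("thickness", "thick"), "thickness"),
--     (("hole1", "hole 1"), "hole1_diameter"),
--     (("hole2", "hole 2"), "hole2_diameter"),
-- ]
--
--
-- def _pick(found, groups):
--     for keywords, label in groups:
--         if any(kw in found for kw in keywords):
--             return label
--     return "unknown"
--
--
-- def parse_instruction(instruction: str) -> dict:
--     """Extract parameter, direction, and magnitude from instruction."""
--     text = instruction.lower()
--     found = set()
--     for i in range(len(text)):
--         for kw in _ALL_KEYWORDS:
--             if text.startswith(kw, i):
--                 found.add(kw)
--     return {
--         "param": _pick(found, _PARAM_GROUPS),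
--         "direction": _pick(found, _DIRECTION_GROUPS),
--     }
-- ===== Notes on version B (the rewrite author's own statement) =====
-- stated objective: alternative
-- what changed: B replaces A's per-keyword substring membership tests with a single positional scan of the text that collects the set of all occurring keywords in one pass, after which each label is chosen from that precomputed found-set.
import Mathlib
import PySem

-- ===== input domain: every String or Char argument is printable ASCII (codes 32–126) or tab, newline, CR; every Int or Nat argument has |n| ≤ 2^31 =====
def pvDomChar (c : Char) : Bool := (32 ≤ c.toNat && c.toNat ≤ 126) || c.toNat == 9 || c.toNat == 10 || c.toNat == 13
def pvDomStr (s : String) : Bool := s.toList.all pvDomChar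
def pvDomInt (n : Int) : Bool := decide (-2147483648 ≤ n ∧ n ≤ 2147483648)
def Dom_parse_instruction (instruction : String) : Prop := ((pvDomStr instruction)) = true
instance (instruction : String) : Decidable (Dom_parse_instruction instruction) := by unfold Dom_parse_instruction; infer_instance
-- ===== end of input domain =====

-- B scans the text once, position by position, collecting the set of all occurring keywords,
-- then picks each label from that found-set (alternative algorithm; same asymptotic cost).

-- ===== PORT A =====
def parse_instruction (instruction : String) : List (String × String) :=
  let instr := PySem.Str.lower instruction
  let direction :=
    if ["longer", "increase", "larger", "bigger", "thicker", "wider"].any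
        (fun w => PySem.Str.isIn w instr) then "increase"
    else if ["shorter", "decrease", "smaller", "thinner", "narrower"].any
        (fun w => PySem.Str.isIn w instr) then "decrease"
    else "unknown"
  let param :=
    if PySem.Str.isIn "leg1" instr || PySem.Str.isIn "leg 1" instr then "leg1_length"
    else if PySem.Str.isIn "leg2" instr || PySem.Str.isIn "leg 2" instr then "leg2_length"
    else if PySem.Str.isIn "width" instr then "width"
    else if PySem.Str.isIn "thickness" instr || PySem.Str.isIn "thick" instr then "thickness"
    else if PySem.Str.isIn "hole1" instr || PySem.Str.isIn "hole 1" instr then "hole1_diameter"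
    else if PySem.Str.isIn "hole2" instr || PySem.Str.isIn "hole 2" instr then "hole2_diameter"
    else "unknown"
  [("param", param), ("direction", direction)]

-- ===== PORT B =====
def pvAllKeywords : List String :=
  ["longer", "increase", "larger", "bigger", "thicker", "wider",
   "shorter", "decrease", "smaller", "thinner", "narrower",
   "leg1", "leg 1", "leg2", "leg 2", "width", "thickness", "thick",
   "hole1", "hole 1", "hole2", "hole 2"]

def pvDirGroups : List (List String × String) :=
  [(["longer", "increase", "larger", "bigger", "thicker", "wider"], "increase"),
   (["shorter", "decrease", "smaller", "thinner", "narrower"], "decrease")]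

def pvParamGroups : List (List String × String) :=
  [(["leg1", "leg 1"], "leg1_length"),
   (["leg2", "leg 2"], "leg2_length"),
   (["width"], "width"),
   (["thickness", "thick"], "thickness"),
   (["hole1", "hole 1"], "hole1_diameter"),
   (["hole2", "hole 2"], "hole2_diameter")]

-- one position of the scan: 'text.startswith(kw, i)' is exact as a prefix test on 'drop i'
def pvMarkAt (tl : List Char) (i : Nat) (acc : PySem.Set String) : PySem.Set String :=
  pvAllKeywords.foldl
    (fun a kw => if PySem.Chars.startswith (tl.drop i) kw.toList then PySem.Set.add a kw else a) acc

def pvFound (tl : List Char) : PySem.Set String :=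
  (List.range tl.length).foldl (fun acc i => pvMarkAt tl i acc) PySem.Set.empty

def pvPick (found : PySem.Set String) : List (List String × String) → String
  | [] => "unknown"
  | (g, label) :: rest =>
      if g.any (fun kw => PySem.Set.contains found kw) then label else pvPick found rest

def parse_instruction_alt (instruction : String) : List (String × String) :=
  let tl := (PySem.Str.lower instruction).toList
  let found := pvFound tl
  [("param", pvPick found pvParamGroups), ("direction", pvPick found pvDirGroups)]

-- ===== PRECONDITION & SPEC =====
def Spec_parse_instruction (instruction : String) (out : List (String × String)) : Prop := out = parse_instruction_alt instruction
instance (instruction : String) (out : List (String × String)) : Decidable (Spec_parse_instruction instruction out) := by unfold Spec_parse_instruction; infer_instance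

-- ===== CLAIM (what is proved, stated in full; the proofs are below) =====
def Claim_equal_parse_instruction : Prop := ∀ (instruction : String), Dom_parse_instruction instruction → Spec_parse_instruction instruction (parse_instruction instruction)

-- ===== LEMMAS AND PROOFS =====

theorem mem_foldl_if_add (P : String → Bool) (kws : List String) (acc : PySem.Set String)
    (w : String) :
    w ∈ kws.foldl (fun a kw => if P kw then PySem.Set.add a kw else a) acc ↔
      w ∈ acc ∨ (w ∈ kws ∧ P w = true) := by
  induction kws generalizing acc with
  | nil => simp [List.foldl]
  | cons k rest ih =>
    simp only [List.foldl_cons, ih]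
    by_cases hk : P k = true
    · simp [hk, PySem.Set.mem_add]
      constructor
      · rintro ((h | rfl) | h)
        · exact Or.inl h
        · exact Or.inr ⟨Or.inl rfl, hk⟩
        · exact Or.inr ⟨Or.inr h.1, h.2⟩
      · rintro (h | ⟨(rfl | hm), hpw⟩)
        · exact Or.inl (Or.inl h)
        · exact Or.inl (Or.inr rfl)
        · exact Or.inr ⟨hm, hpw⟩
    · simp only [hk, List.mem_cons]
      constructor
      · rintro (h | h)
        · exact Or.inl h
        · exact Or.inr ⟨Or.inr h.1, h.2⟩
      · rintro (h | ⟨(rfl | hm), hpw⟩)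
        · exact Or.inl h
        · exact absurd hpw hk
        · exact Or.inr ⟨hm, hpw⟩

theorem mem_foldl_mark (tl : List Char) (ps : List Nat) (acc : PySem.Set String) (w : String) :
    w ∈ ps.foldl (fun acc i => pvMarkAt tl i acc) acc ↔
      w ∈ acc ∨ (w ∈ pvAllKeywords ∧
        ∃ i ∈ ps, PySem.Chars.startswith (tl.drop i) w.toList = true) := by
  induction ps generalizing acc with
  | nil => simp [List.foldl]
  | cons p rest ih =>
    rw [List.foldl_cons, ih]
    simp only [pvMarkAt, mem_foldl_if_add, List.mem_cons]
    constructor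
    · rintro ((h | ⟨hm, hs⟩) | ⟨hm, i, hi, hs⟩)
      · exact Or.inl h
      · exact Or.inr ⟨hm, p, Or.inl rfl, hs⟩
      · exact Or.inr ⟨hm, i, Or.inr hi, hs⟩
    · rintro (h | ⟨hm, i, (rfl | hi), hs⟩)
      · exact Or.inl (Or.inl h)
      · exact Or.inl (Or.inr ⟨hm, hs⟩)
      · exact Or.inr ⟨hm, i, hi, hs⟩

theorem mem_found (tl : List Char) (w : String) :
    w ∈ pvFound tl ↔
      w ∈ pvAllKeywords ∧ ∃ i < tl.length, PySem.Chars.startswith (tl.drop i) w.toList = true := by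
  unfold pvFound
  rw [mem_foldl_mark]
  simp [PySem.Set.empty, List.mem_range]

theorem contains_found (t : String) (w : String) (hw : w ∈ pvAllKeywords)
    (hne : w.toList ≠ []) :
    PySem.Set.contains (pvFound t.toList) w = PySem.Str.isIn w t := by
  rw [Bool.eq_iff_iff, PySem.Set.contains_iff, mem_found]
  rw [show PySem.Str.isIn w t = PySem.Chars.isIn w.toList t.toList from by simp]
  rw [← PySem.Chars.exists_prefix_drop_iff_isIn]
  constructor
  · rintro ⟨-, i, -, hs⟩
    exact ⟨i, (PySem.Chars.startswith_iff _ _).mp hs⟩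
  · rintro ⟨j, hj⟩
    refine ⟨hw, j, ?_, (PySem.Chars.startswith_iff _ _).mpr hj⟩
    by_contra h
    push Not at h
    rw [List.drop_eq_nil_of_le h] at hj
    exact hne (List.prefix_nil.mp hj)

-- ===== VERDICT (by name: the statement is the Claim_ definition above) =====
theorem parse_instruction_spec : Claim_equal_parse_instruction := by
  intro instruction _
  unfold Spec_parse_instruction parse_instruction parse_instruction_alt
  have H : ∀ w, w ∈ pvAllKeywords → w.toList ≠ [] →
      PySem.Set.contains (pvFound (PySem.Str.lower instruction).toList) w =
        PySem.Str.isIn w (PySem.Str.lower instruction) :=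
    fun w hw hne => contains_found _ w hw hne
  simp only [pvPick, pvParamGroups, pvDirGroups, List.any_cons, List.any_nil, Bool.or_false,
    H "longer" (by decide) (by decide), H "increase" (by decide) (by decide),
    H "larger" (by decide) (by decide), H "bigger" (by decide) (by decide),
    H "thicker" (by decide) (by decide), H "wider" (by decide) (by decide),
    H "shorter" (by decide) (by decide), H "decrease" (by decide) (by decide),
    H "smaller" (by decide) (by decide), H "thinner" (by decide) (by decide),
    H "narrower" (by decide) (by decide),
    H "leg1" (by decide) (by decide), H "leg 1" (by decide) (by decide),
    H "leg2" (by decide) (by decide), H "leg 2" (by decide) (by decide),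
    H "width" (by decide) (by decide),
    H "thickness" (by decide) (by decide), H "thick" (by decide) (by decide),
    H "hole1" (by decide) (by decide), H "hole 1" (by decide) (by decide),
    H "hole2" (by decide) (by decide), H "hole 2" (by decide) (by decide)]
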